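-- pv_equiv track=rewrite | github.com/topherCantrell/sim-Katamino | src/board_new.py | strip_string_rep
-- ===== SOURCE A (Python) =====
-- def strip_string_rep(br):
--     b = br.split('\n')
--     li = len(b[0])
--     lj = 0
--     blank = '.' * len(b[0])
--     for i in range(len(b) - 1, -1, -1):
--         if b[i] == blank:
--             del b[i]
--             continue
--         g = b[i]
--         ki = 0
--         while g[ki] == '.':
--             ki = ki + 1
--         kj = len(g) - 1
--         while g[kj] == '.':
--             kj = kj - 1
--         if ki < li:
--             li = ki
--         if kj > lj:
--             lj = kj
--     for i in range(len(b)):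
--         g = b[i][li:lj + 1]
--         b[i] = g
--     return '\n'.join(b)
-- ===== SOURCE B (Python) =====
-- def strip_string_rep(br):
--     rows = br.split('\n')
--     blank = '.' * len(rows[0])
--     rows = [r for r in rows if r != blank]
--     if not rows:
--         return ''
--     width = max(len(r) for r in rows)
--     li = 0
--     for j in range(width):
--         if any(j < len(r) and r[j] != '.' for r in rows):
--             li = j
--             break
--     lj = 0
--     for j in range(width - 1, -1, -1):
--         if any(j < len(r) and r[j] != '.' for r in rows):
--             lj = j
--             break
--     return '\n'.join(r[li:lj + 1] for r in rows)
-- ===== Notes on version B (the rewrite author's own statement) =====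
-- stated objective: alternative
-- what changed: A's single fused reverse row loop (in-place del of blank rows plus per-row while scans feeding a running min/max) becomes a column-oriented search: after filtering blank rows, the left bound is found by scanning column indices upward and the right bound downward until some row has a non-dot in that column, then the rows are sliced.
-- intended difference: On ragged grids where every surviving row starts with more leading dots than the first row is long, A returns rows with border dots kept (its left-trim minimum is seeded with len(b[0]) and never beaten), while B trims to the first column containing a non-dot, which is the intended border trim. — e.g. on strip_string_rep(".\n..x"): A returns ".x", B returns "x"
import Mathlib
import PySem

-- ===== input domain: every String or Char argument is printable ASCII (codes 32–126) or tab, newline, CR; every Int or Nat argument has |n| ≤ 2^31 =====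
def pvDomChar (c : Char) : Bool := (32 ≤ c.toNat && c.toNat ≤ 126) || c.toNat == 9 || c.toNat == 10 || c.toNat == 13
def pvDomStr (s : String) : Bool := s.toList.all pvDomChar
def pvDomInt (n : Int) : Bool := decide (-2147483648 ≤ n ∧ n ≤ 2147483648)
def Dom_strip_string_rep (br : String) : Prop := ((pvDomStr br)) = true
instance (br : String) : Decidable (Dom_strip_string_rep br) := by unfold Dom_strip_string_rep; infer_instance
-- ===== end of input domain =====

-- B replaces A's fused reverse row loop (in-place delete + per-row while scans feeding a running
-- min/max) by a column-oriented search: filter the blank rows, then scan column indices upward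
-- (and downward) until some row shows a non-dot in that column (objective: alternative).

-- ===== PORT A =====
-- 'ki = 0; while g[ki] == '.': ki += 1' — none = IndexError (the scan ran off the row)
def pvLead? : List Char → Option Nat
  | [] => none
  | c :: t => if c = '.' then (pvLead? t).map (· + 1) else some 0

def pvLoopA (blank : List Char) : List (List Char) → Nat → Nat → Option (List (List Char) × Nat × Nat)
  | [], li, lj => some ([], li, lj)
  | g :: rest, li, lj =>
    -- 'for i in range(len(b)-1, -1, -1)': later rows are processed first, so recurse on rest first
    match pvLoopA blank rest li lj with
    | none => none
    | some (kept, li', lj') =>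
      if g = blank then some (kept, li', lj')   -- 'del b[i]; continue'
      else
        -- the backward 'while g[kj] == '.'' over indices len-1, len-2, … is the forward scan
        -- over the reversed row; exact here because the leading scan succeeded (a non-dot exists,
        -- so neither scan leaves the row; Python's IndexError happens in the leading scan first)
        match pvLead? g, pvLead? g.reverse with
        | some ki, some t =>
          let kj := g.length - 1 - t
          some (g :: kept, if ki < li' then ki else li', if lj' < kj then kj else lj')
        | _, _ => none

def strip_string_rep (br : String) : String :=
  let b := PySem.Chars.splitOn br.toList ['\n']
  let w := (b.headD []).length            -- len(b[0]); split never returns an empty list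
  let blank := List.replicate w '.'
  match pvLoopA blank b w 0 with
  | none => ""                            -- unreachable under Pre_ (Python raises IndexError)
  | some (kept, li, lj) =>
      String.ofList (PySem.Chars.join ['\n']
        (kept.map (fun g => PySem.List.slice g (some (li : Int)) (some ((lj : Int) + 1)))))

-- ===== PORT B =====
-- 'any(j < len(r) and r[j] != '.' for r in rows)': is column j a hit (some row non-dot there)?
def pvHit (rows : List (List Char)) (j : Nat) : Bool :=
  rows.any (fun r => decide (j < r.length) && decide (¬ r.getD j '.' = '.'))

-- 'for j in range(width): if <hit>: li = j; break' — fuel = number of remaining indices,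
-- 0 (the Python initial value) if the loop ends without a break
def pvScanUp (rows : List (List Char)) : Nat → Nat → Nat
  | _, 0 => 0
  | j, fuel + 1 => if pvHit rows j then j else pvScanUp rows (j + 1) fuel

-- 'for j in range(width - 1, -1, -1): if <hit>: lj = j; break'
def pvScanDown (rows : List (List Char)) : Nat → Nat → Nat
  | _, 0 => 0
  | j, fuel + 1 => if pvHit rows j then j else pvScanDown rows (j - 1) fuel

def strip_string_rep_alt (br : String) : String :=
  let b := PySem.Chars.splitOn br.toList ['\n']
  let blank := List.replicate ((b.headD []).length) '.'
  let rows := b.filter (fun r => decide (r ≠ blank))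
  if rows = [] then ""
  else
    let width := (PySem.List.max? (rows.map List.length) (fun x => x)).getD 0  -- max(len(r) for r in rows)
    let li := pvScanUp rows 0 width
    let lj := pvScanDown rows (width - 1) width
    String.ofList (PySem.Chars.join ['\n']
      (rows.map (fun r => PySem.List.slice r (some (li : Int)) (some ((lj : Int) + 1)))))

-- ===== PRECONDITION & SPEC =====
-- Pre_ excludes exactly the inputs where A raises IndexError: a line consisting only of dots
-- (possibly empty) that is not equal to the blank line '.'*len(b[0]).
def Pre_strip_string_rep (br : String) : Prop :=
  ((PySem.Chars.splitOn br.toList ['\n']).all (fun r =>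
    decide (r = List.replicate (((PySem.Chars.splitOn br.toList ['\n']).headD []).length) '.')
      || r.any (fun c => decide (c ≠ '.')))) = true
instance (br : String) : Decidable (Pre_strip_string_rep br) := by unfold Pre_strip_string_rep; infer_instance
def pvWitness_strip_string_rep : String := "x."

def pvLead (r : List Char) : Nat := (r.takeWhile (fun c => c == '.')).length

-- On ragged grids where every surviving row starts with more leading dots than the first row is
-- long, A's left-trim column is stuck at len(b[0]) (the seed of its running minimum) and it
-- returns rows with border dots kept, while B trims to the first column containing a non-dot,
-- which is the intended border trim.
def D_strip_string_rep (br : String) : Prop :=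
  ((PySem.Chars.splitOn br.toList ['\n']).any (fun r => r.any (fun c => decide (c ≠ '.')))
    && (PySem.Chars.splitOn br.toList ['\n']).all (fun g =>
         !(g.any (fun c => decide (c ≠ '.'))) || decide (((PySem.Chars.splitOn br.toList ['\n']).headD []).length < pvLead g))) = true
instance (br : String) : Decidable (D_strip_string_rep br) := by unfold D_strip_string_rep; infer_instance

def Spec_strip_string_rep (br : String) (out : String) : Prop :=
  ¬ D_strip_string_rep br → out = strip_string_rep_alt br
instance (br : String) (out : String) : Decidable (Spec_strip_string_rep br out) := by unfold Spec_strip_string_rep; infer_instance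

def pvDiffWitness_strip_string_rep : String := ".\n..x"
def pvDiffWitnessOut_strip_string_rep : String × String := (".x", "x")


-- ===== CLAIM (what is proved, stated in full; the proofs are below) =====
def Claim_unchanged_strip_string_rep : Prop := ∀ (br : String), Dom_strip_string_rep br → Pre_strip_string_rep br → Spec_strip_string_rep br (strip_string_rep br)
def Claim_changed_strip_string_rep : Prop := Dom_strip_string_rep (pvDiffWitness_strip_string_rep) ∧ Pre_strip_string_rep (pvDiffWitness_strip_string_rep) ∧ D_strip_string_rep (pvDiffWitness_strip_string_rep) ∧ strip_string_rep (pvDiffWitness_strip_string_rep) = pvDiffWitnessOut_strip_string_rep.1 ∧ strip_string_rep_alt (pvDiffWitness_strip_string_rep) = pvDiffWitnessOut_strip_string_rep.2 ∧ pvDiffWitnessOut_strip_string_rep.1 ≠ pvDiffWitnessOut_strip_string_rep.2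

def Claim_exact_strip_string_rep : Prop := ∀ (br : String), Dom_strip_string_rep br → Pre_strip_string_rep br → D_strip_string_rep br → strip_string_rep br ≠ strip_string_rep_alt br


-- ===== LEMMAS AND PROOFS =====

theorem pv_lead_complement (s : List Char) :
    (s.dropWhile (fun c => c == '.')).length = s.length - pvLead s ∧ pvLead s ≤ s.length := by
  have h := congrArg List.length (List.takeWhile_append_dropWhile (p := fun c => c == '.') (l := s))
  rw [List.length_append] at h
  unfold pvLead
  constructor <;> omega

theorem pv_cons_wit {c : Char} {t : List Char} {d : Char} (hd : d ∈ c :: t) (hdne : ¬ d = '.')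
    (hc : c = '.') : ∃ e ∈ t, ¬ e = '.' := by
  rcases List.mem_cons.1 hd with h1 | h1
  · exact absurd hc (h1 ▸ hdne)
  · exact ⟨d, h1, hdne⟩

theorem pv_lead?_eq (r : List Char) (h : ∃ c ∈ r, ¬ c = '.') :
    pvLead? r = some (pvLead r) := by
  induction r with
  | nil => simp at h
  | cons c t ih =>
    obtain ⟨d, hd, hdne⟩ := h
    by_cases hc : c = '.'
    · subst hc
      simp [pvLead?, pvLead, ih (pv_cons_wit hd hdne rfl)]
    · simp [pvLead?, pvLead, hc]

theorem pv_lead_lt (r : List Char) (h : ∃ c ∈ r, ¬ c = '.') : pvLead r < r.length := by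
  induction r with
  | nil => simp at h
  | cons c t ih =>
    obtain ⟨d, hd, hdne⟩ := h
    by_cases hc : c = '.'
    · subst hc
      have := ih (pv_cons_wit hd hdne rfl)
      simp [pvLead] at this ⊢
      omega
    · simp [pvLead, hc]

theorem pv_rev_wit {r : List Char} (h : ∃ c ∈ r, ¬ c = '.') : ∃ c ∈ r.reverse, ¬ c = '.' := by
  obtain ⟨c, hc, hcne⟩ := h
  exact ⟨c, List.mem_reverse.2 hc, hcne⟩

theorem pv_lead_cons_dot (t : List Char) : pvLead ('.' :: t) = pvLead t + 1 := by
  simp [pvLead]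

theorem pv_lead_cons_nondot {c : Char} (t : List Char) (hc : ¬ c = '.') : pvLead (c :: t) = 0 := by
  simp [pvLead, hc]

theorem pv_lead_dot (r : List Char) : ∀ j, j < pvLead r → r.getD j '.' = '.' ∧ j < r.length := by
  induction r with
  | nil => intro j hj; simp [pvLead] at hj
  | cons c t ih =>
    intro j hj
    by_cases hc : c = '.'
    · subst hc
      rw [pv_lead_cons_dot] at hj
      cases j with
      | zero => exact ⟨rfl, by simp⟩
      | succ j' =>
        obtain ⟨h1, h2⟩ := ih j' (by omega)
        exact ⟨by simpa using h1, by simp; omega⟩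
    · rw [pv_lead_cons_nondot _ hc] at hj
      omega

theorem pv_lead_hit (r : List Char) (h : ∃ c ∈ r, ¬ c = '.') :
    pvLead r < r.length ∧ ¬ r.getD (pvLead r) '.' = '.' := by
  induction r with
  | nil => simp at h
  | cons c t ih =>
    obtain ⟨d, hd, hdne⟩ := h
    by_cases hc : c = '.'
    · subst hc
      obtain ⟨h1, h2⟩ := ih (pv_cons_wit hd hdne rfl)
      rw [pv_lead_cons_dot]
      exact ⟨by simp; omega, by simpa using h2⟩
    · rw [pv_lead_cons_nondot _ hc]
      exact ⟨by simp, by simpa using hc⟩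

theorem pv_getD_rev (r : List Char) (k : Nat) (hk : k < r.length) :
    r.reverse.getD k '.' = r.getD (r.length - 1 - k) '.' := by
  have h1 : k < r.reverse.length := by simpa using hk
  have h2 : r.length - 1 - k < r.length := by omega
  rw [List.getD_eq_getElem _ _ h1, List.getD_eq_getElem _ _ h2, List.getElem_reverse]

theorem pv_last_hit (r : List Char) (h : ∃ c ∈ r, ¬ c = '.') :
    r.length - 1 - pvLead r.reverse < r.length ∧
      ¬ r.getD (r.length - 1 - pvLead r.reverse) '.' = '.' := by
  obtain ⟨h1, h2⟩ := pv_lead_hit r.reverse (pv_rev_wit h)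
  rw [List.length_reverse] at h1
  rw [pv_getD_rev r (pvLead r.reverse) h1] at h2
  exact ⟨by omega, h2⟩

theorem pv_last_dot (r : List Char) (h : ∃ c ∈ r, ¬ c = '.') (j : Nat)
    (hgt : r.length - 1 - pvLead r.reverse < j) (hlt : j < r.length) :
    r.getD j '.' = '.' := by
  have hlr := (pv_lead_hit r.reverse (pv_rev_wit h)).1
  rw [List.length_reverse] at hlr
  have hk : r.length - 1 - j < pvLead r.reverse := by omega
  have hd := (pv_lead_dot r.reverse (r.length - 1 - j) hk).1
  rw [pv_getD_rev r _ (by omega)] at hd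
  have hj : r.length - 1 - (r.length - 1 - j) = j := by omega
  rw [hj] at hd
  exact hd

theorem pv_hit_true (rows : List (List Char)) (j : Nat) (r0 : List Char) (hr0 : r0 ∈ rows)
    (hl : j < r0.length) (hne : ¬ r0.getD j '.' = '.') : pvHit rows j = true := by
  unfold pvHit
  rw [List.any_eq_true]
  refine ⟨r0, hr0, ?_⟩
  simp only [Bool.and_eq_true, decide_eq_true_eq]
  exact ⟨hl, hne⟩

theorem pv_hit_false_lo (rows : List (List Char)) (m j : Nat)
    (hm : ∀ r ∈ rows, m ≤ pvLead r) (hj : j < m) : pvHit rows j = false := by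
  unfold pvHit
  rw [List.any_eq_false]
  intro r hr
  by_cases hlen : j < r.length
  · have hd := (pv_lead_dot r j (by have := hm r hr; omega)).1
    rw [decide_eq_false (not_not_intro hd), Bool.and_false]
    exact Bool.false_ne_true
  · rw [decide_eq_false hlen, Bool.false_and]
    exact Bool.false_ne_true

theorem pv_hit_false_hi (rows : List (List Char)) (L j : Nat)
    (hall : ∀ r ∈ rows, ∃ c ∈ r, ¬ c = '.')
    (hL : ∀ r ∈ rows, r.length - 1 - pvLead r.reverse ≤ L) (hj : L < j) :
    pvHit rows j = false := by
  unfold pvHit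
  rw [List.any_eq_false]
  intro r hr
  by_cases hlen : j < r.length
  · have hd := pv_last_dot r (hall r hr) j (by have := hL r hr; omega) hlen
    rw [decide_eq_false (not_not_intro hd), Bool.and_false]
    exact Bool.false_ne_true
  · rw [decide_eq_false hlen, Bool.false_and]
    exact Bool.false_ne_true

theorem pv_scanUp_eq (rows : List (List Char)) (j0 : Nat) : ∀ (fuel j : Nat), j ≤ j0 →
    j0 - j < fuel → (∀ k, j ≤ k → k < j0 → pvHit rows k = false) → pvHit rows j0 = true →
    pvScanUp rows j fuel = j0 := by
  intro fuel
  induction fuel with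
  | zero => intro j _ hf; omega
  | succ n ih =>
    intro j hle hf hlo hhit
    rw [pvScanUp]
    by_cases hj : j = j0
    · subst hj; rw [hhit]; rfl
    · rw [hlo j le_rfl (by omega)]
      exact ih (j + 1) (by omega) (by omega) (fun k hk1 hk2 => hlo k (by omega) hk2) hhit

theorem pv_scanDown_eq (rows : List (List Char)) (j0 : Nat) : ∀ (fuel j : Nat), j0 ≤ j →
    j - j0 < fuel → (∀ k, j0 < k → k ≤ j → pvHit rows k = false) → pvHit rows j0 = true →
    pvScanDown rows j fuel = j0 := by
  intro fuel
  induction fuel with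
  | zero => intro j _ hf; omega
  | succ n ih =>
    intro j hle hf hhi hhit
    rw [pvScanDown]
    by_cases hj : j = j0
    · subst hj; rw [hhit]; rfl
    · rw [hhi j (by omega) le_rfl]
      exact ih (j - 1) (by omega) (by omega) (fun k hk1 hk2 => hhi k hk1 (by omega)) hhit

theorem pv_list_min (L : List Nat) (h : L ≠ []) : ∃ m ∈ L, ∀ x ∈ L, m ≤ x := by
  induction L with
  | nil => exact absurd rfl h
  | cons x t ih =>
    cases t with
    | nil => exact ⟨x, List.mem_cons_self .., by simp⟩
    | cons y u =>
      obtain ⟨m, hm, hmin⟩ := ih (List.cons_ne_nil _ _)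
      by_cases hxm : x ≤ m
      · refine ⟨x, List.mem_cons_self .., ?_⟩
        intro z hz
        rcases List.mem_cons.1 hz with h1 | h1
        · omega
        · have := hmin z h1; omega
      · refine ⟨m, List.mem_cons_of_mem _ hm, ?_⟩
        intro z hz
        rcases List.mem_cons.1 hz with h1 | h1
        · omega
        · exact hmin z h1

theorem pv_list_max (L : List Nat) (h : L ≠ []) : ∃ m ∈ L, ∀ x ∈ L, x ≤ m := by
  induction L with
  | nil => exact absurd rfl h
  | cons x t ih =>
    cases t with
    | nil => exact ⟨x, List.mem_cons_self .., by simp⟩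
    | cons y u =>
      obtain ⟨m, hm, hmax⟩ := ih (List.cons_ne_nil _ _)
      by_cases hxm : m ≤ x
      · refine ⟨x, List.mem_cons_self .., ?_⟩
        intro z hz
        rcases List.mem_cons.1 hz with h1 | h1
        · omega
        · have := hmax z h1; omega
      · refine ⟨m, List.mem_cons_of_mem _ hm, ?_⟩
        intro z hz
        rcases List.mem_cons.1 hz with h1 | h1
        · omega
        · exact hmax z h1

theorem pv_foldr_min_ge (L : List Nat) (w m : Nat) (hw : m ≤ w) (hL : ∀ x ∈ L, m ≤ x) :
    m ≤ L.foldr min w := by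
  induction L with
  | nil => exact hw
  | cons x t ih =>
    have h1 := hL x (List.mem_cons_self ..)
    have h2 := ih (fun y hy => hL y (List.mem_cons_of_mem _ hy))
    simp only [List.foldr_cons]
    omega

theorem pv_foldr_min_eq (L : List Nat) (w m : Nat) (hm : m ∈ L) (hmin : ∀ x ∈ L, m ≤ x)
    (hw : m ≤ w) : L.foldr min w = m := by
  induction L with
  | nil => simp at hm
  | cons x t ih =>
    rcases List.mem_cons.1 hm with h1 | h1
    · subst h1
      have := pv_foldr_min_ge t w m hw (fun y hy => hmin y (List.mem_cons_of_mem _ hy))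
      simp only [List.foldr_cons]
      omega
    · have hx := hmin x (List.mem_cons_self ..)
      have := ih h1 (fun y hy => hmin y (List.mem_cons_of_mem _ hy))
      simp only [List.foldr_cons]
      omega

theorem pv_foldr_min_const (L : List Nat) (w : Nat) (h : ∀ x ∈ L, w ≤ x) :
    L.foldr min w = w := by
  induction L with
  | nil => rfl
  | cons x t ih =>
    have h1 := h x (List.mem_cons_self ..)
    have h2 := ih (fun y hy => h y (List.mem_cons_of_mem _ hy))
    simp only [List.foldr_cons]
    omega

theorem pv_foldr_max_le (L : List Nat) (w M : Nat) (hw : w ≤ M) (hL : ∀ x ∈ L, x ≤ M) :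
    L.foldr max w ≤ M := by
  induction L with
  | nil => exact hw
  | cons x t ih =>
    have h1 := hL x (List.mem_cons_self ..)
    have h2 := ih (fun y hy => hL y (List.mem_cons_of_mem _ hy))
    simp only [List.foldr_cons]
    omega

theorem pv_foldr_max_eq (L : List Nat) (w M : Nat) (hM : M ∈ L) (hmax : ∀ x ∈ L, x ≤ M)
    (hw : w ≤ M) : L.foldr max w = M := by
  induction L with
  | nil => simp at hM
  | cons x t ih =>
    rcases List.mem_cons.1 hM with h1 | h1
    · subst h1
      have := pv_foldr_max_le t w M hw (fun y hy => hmax y (List.mem_cons_of_mem _ hy))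
      simp only [List.foldr_cons]
      omega
    · have hx := hmax x (List.mem_cons_self ..)
      have := ih h1 (fun y hy => hmax y (List.mem_cons_of_mem _ hy))
      simp only [List.foldr_cons]
      omega

theorem pv_loopA_char (blank : List Char) (b : List (List Char))
    (h : ∀ r ∈ b, r = blank ∨ ∃ c ∈ r, ¬ c = '.') : ∀ (li lj : Nat),
    pvLoopA blank b li lj = some
      (b.filter (fun r => decide (r ≠ blank)),
       (b.filter (fun r => decide (r ≠ blank))).foldr (fun r a => min (pvLead r) a) li,
       (b.filter (fun r => decide (r ≠ blank))).foldr
         (fun r a => max (r.length - 1 - pvLead r.reverse) a) lj) := by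
  induction b with
  | nil => intro li lj; rfl
  | cons g rest ih =>
    intro li lj
    have hg := h g (List.mem_cons_self ..)
    have hrest := fun r hr => h r (List.mem_cons_of_mem _ hr)
    rw [pvLoopA, ih hrest li lj]
    by_cases hgb : g = blank
    · simp [hgb]
    · have hex : ∃ c ∈ g, ¬ c = '.' := hg.resolve_left hgb
      have hpg : (decide (g ≠ blank)) = true := by simp [hgb]
      rw [pv_lead?_eq g hex, pv_lead?_eq g.reverse (pv_rev_wit hex)]
      simp only [List.filter_cons, hpg, if_true, List.foldr_cons, if_neg hgb]
      show some _ = some _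
      refine congrArg some (Prod.ext rfl (Prod.ext ?_ ?_)) <;> simp only
      · split_ifs <;> omega
      · split_ifs <;> omega

theorem pv_lead_trail_aux (s u : List Char) (h : ∃ c ∈ s, ¬ c = '.') :
    pvLead (s ++ u) = pvLead s := by
  induction s with
  | nil => simp at h
  | cons c t ih =>
    obtain ⟨d, hd, hdn⟩ := h
    by_cases hc : c = '.'
    · subst hc
      have := ih (pv_cons_wit hd hdn rfl)
      rw [List.cons_append, pv_lead_cons_dot, pv_lead_cons_dot, this]
    · rw [List.cons_append, pv_lead_cons_nondot _ hc, pv_lead_cons_nondot _ hc]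

theorem pv_lead_append_dots (s u : List Char) (h : ∀ c ∈ s, c = '.') :
    pvLead (s ++ u) = s.length + pvLead u := by
  induction s with
  | nil => simp
  | cons c t ih =>
    have hc := h c (List.mem_cons_self ..)
    subst hc
    rw [List.cons_append, pv_lead_cons_dot, ih (fun d hd => h d (List.mem_cons_of_mem _ hd))]
    simp
    omega

theorem pv_lead_trail (r : List Char) (h : ∃ c ∈ r, ¬ c = '.') :
    pvLead r + pvLead r.reverse < r.length := by
  induction r with
  | nil => simp at h
  | cons c t ih =>
    rw [List.reverse_cons]
    by_cases hc : c = '.'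
    · subst hc
      obtain ⟨d, hd, hdn⟩ := h
      have hT := pv_cons_wit hd hdn rfl
      rw [pv_lead_trail_aux _ _ (pv_rev_wit hT), pv_lead_cons_dot]
      have := ih hT
      simp only [List.length_cons]
      omega
    · by_cases hT : ∃ e ∈ t, ¬ e = '.'
      · rw [pv_lead_trail_aux _ _ (pv_rev_wit hT), pv_lead_cons_nondot _ hc]
        have hle := (pv_lead_complement t.reverse).2
        rw [List.length_reverse] at hle
        simp only [List.length_cons]
        omega
      · have hAllT : ∀ e ∈ t, e = '.' := fun e he => by_contra (fun hne => hT ⟨e, he, hne⟩)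
        have hAllRev : ∀ e ∈ t.reverse, e = '.' := fun e he => hAllT e (List.mem_reverse.1 he)
        rw [pv_lead_append_dots _ _ hAllRev, pv_lead_cons_nondot _ hc,
          pv_lead_cons_nondot _ hc, List.length_reverse]
        simp

theorem pv_sum_lt (L : List (List Char)) (f g : List Char → Nat) (hne : L ≠ [])
    (h : ∀ x ∈ L, g x < f x) : (L.map g).sum < (L.map f).sum := by
  induction L with
  | nil => exact absurd rfl hne
  | cons x t ih =>
    cases t with
    | nil => simpa using h x (List.mem_cons_self ..)
    | cons y u =>
      have h1 := h x (List.mem_cons_self ..)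
      have h2 := ih (List.cons_ne_nil _ _) (fun z hz => h z (List.mem_cons_of_mem _ hz))
      simp only [List.map_cons, List.sum_cons] at h2 ⊢
      omega

theorem pv_join_len (L : List (List Char)) :
    (PySem.Chars.join ['\n'] L).length = (L.map List.length).sum + (L.length - 1) := by
  induction L with
  | nil => simp [PySem.Chars.join_nil]
  | cons p rest ih =>
    cases rest with
    | nil => simp [PySem.Chars.join_singleton]
    | cons q t =>
      rw [PySem.Chars.join_cons_cons]
      simp only [List.length_append, List.map_cons, List.sum_cons, List.length_cons, List.length_nil] at ih ⊢
      omega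

-- the two column-scan bounds of B are exactly the min leading index and the max last non-dot index
theorem pv_scan_vals (rows : List (List Char)) (hAll : ∀ r ∈ rows, ∃ c ∈ r, ¬ c = '.')
    (m L W : Nat)
    (hmmem : m ∈ rows.map pvLead) (hmmin : ∀ x ∈ rows.map pvLead, m ≤ x)
    (hLmem : L ∈ rows.map (fun r => r.length - 1 - pvLead r.reverse))
    (hLmax : ∀ x ∈ rows.map (fun r => r.length - 1 - pvLead r.reverse), x ≤ L)
    (hW : PySem.List.max? (rows.map List.length) (fun x => x) = some W) :
    pvScanUp rows 0 W = m ∧ pvScanDown rows (W - 1) W = L := by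
  have hWmax := PySem.List.max?_isMax hW
  obtain ⟨r0, hr0, hr0m⟩ := List.mem_map.1 hmmem
  obtain ⟨r1, hr1, hr1L⟩ := List.mem_map.1 hLmem
  have hmlt : m < r0.length := hr0m ▸ pv_lead_lt r0 (hAll r0 hr0)
  have hr0W : r0.length ≤ W := hWmax _ (List.mem_map_of_mem hr0)
  have hr1W : r1.length ≤ W := hWmax _ (List.mem_map_of_mem hr1)
  have hr1len : 0 < r1.length := by
    obtain ⟨c, hc, _⟩ := hAll r1 hr1
    exact List.length_pos_of_mem hc
  have hhitm : pvHit rows m = true := by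
    obtain ⟨h1, h2⟩ := pv_lead_hit r0 (hAll r0 hr0)
    exact pv_hit_true rows m r0 hr0 (hr0m ▸ h1) (hr0m ▸ h2)
  have hhitL : pvHit rows L = true := by
    obtain ⟨h1, h2⟩ := pv_last_hit r1 (hAll r1 hr1)
    exact pv_hit_true rows L r1 hr1 (hr1L ▸ h1) (hr1L ▸ h2)
  have hLle : L ≤ W - 1 := by omega
  constructor
  · exact pv_scanUp_eq rows m W 0 (Nat.zero_le m) (by omega)
      (fun k _ hk => pv_hit_false_lo rows m k
        (fun r hr => hmmin _ (List.mem_map_of_mem hr)) hk) hhitm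
  · exact pv_scanDown_eq rows L W (W - 1) hLle (by omega)
      (fun k hk1 _ => pv_hit_false_hi rows L k hAll
        (fun r hr => hLmax _ (List.mem_map_of_mem hr)) hk1) hhitL

theorem pv_main (b : List (List Char)) (w : Nat)
    (hPre : ∀ r ∈ b, r = List.replicate w '.' ∨ ∃ c ∈ r, ¬ c = '.')
    (hND : ¬ ((b.filter (fun r => decide (r ≠ List.replicate w '.'))) ≠ [] ∧
        ∀ r ∈ (b.filter (fun r => decide (r ≠ List.replicate w '.'))), w < pvLead r)) :
    (match pvLoopA (List.replicate w '.') b w 0 with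
     | none => ""
     | some (kept, li, lj) =>
        String.ofList (PySem.Chars.join ['\n']
          (kept.map (fun g => PySem.List.slice g (some (li : Int)) (some ((lj : Int) + 1)))))) =
    (let rows := b.filter (fun r => decide (r ≠ List.replicate w '.'))
     if rows = [] then ""
     else
       let width := (PySem.List.max? (rows.map List.length) (fun x => x)).getD 0
       let li := pvScanUp rows 0 width
       let lj := pvScanDown rows (width - 1) width
       String.ofList (PySem.Chars.join ['\n']
         (rows.map (fun r => PySem.List.slice r (some (li : Int)) (some ((lj : Int) + 1)))))) := by
  rw [pv_loopA_char (List.replicate w '.') b hPre w 0]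
  set rows := b.filter (fun r => decide (r ≠ List.replicate w '.')) with hrows_def
  by_cases hrows : rows = []
  · rw [hrows]
    rfl
  · have hAll : ∀ r ∈ rows, ∃ c ∈ r, ¬ c = '.' := by
      intro r hr
      have hmem := List.mem_filter.1 (hrows_def ▸ hr)
      exact (hPre r hmem.1).resolve_left (of_decide_eq_true hmem.2)
    obtain ⟨m, hmmem, hmmin⟩ := pv_list_min (rows.map pvLead) (by simpa using hrows)
    obtain ⟨L, hLmem, hLmax⟩ :=
      pv_list_max (rows.map (fun r => r.length - 1 - pvLead r.reverse)) (by simpa using hrows)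
    rcases hW : PySem.List.max? (rows.map List.length) (fun x => x) with _ | W
    · rw [PySem.List.max?_eq_none_iff] at hW
      exact absurd (List.map_eq_nil_iff.1 hW) hrows
    obtain ⟨hup, hdown⟩ := pv_scan_vals rows hAll m L W hmmem hmmin hLmem hLmax hW
    have hmw : m ≤ w := by
      push_neg at hND
      obtain ⟨r1, hr1, hle⟩ := hND hrows
      exact le_trans (hmmin (pvLead r1) (List.mem_map_of_mem hr1)) hle
    have hli : rows.foldr (fun r a => min (pvLead r) a) w = m := by
      rw [← List.foldr_map]
      exact pv_foldr_min_eq _ w m hmmem hmmin hmw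
    have hlj : rows.foldr (fun r a => max (r.length - 1 - pvLead r.reverse) a) 0 = L := by
      rw [← List.foldr_map]
      exact pv_foldr_max_eq _ 0 L hLmem hLmax (Nat.zero_le _)
    simp only [hli, hlj, if_neg hrows, hW, Option.getD_some, hup, hdown]

theorem pv_D_bridge (b : List (List Char)) (w : Nat)
    (hPre : ∀ r ∈ b, r = List.replicate w '.' ∨ ∃ c ∈ r, ¬ c = '.')
    (hnd : ¬ ((b.any (fun r => r.any (fun c => decide (c ≠ '.')))
        && b.all (fun g => !(g.any (fun c => decide (c ≠ '.'))) || decide (w < pvLead g))) = true)) :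
    ¬ ((b.filter (fun r => decide (r ≠ List.replicate w '.'))) ≠ [] ∧
       ∀ r ∈ (b.filter (fun r => decide (r ≠ List.replicate w '.'))), w < pvLead r) := by
  rintro ⟨hne, hall⟩
  apply hnd
  rw [Bool.and_eq_true]
  constructor
  · rcases hf : b.filter (fun r => decide (r ≠ List.replicate w '.')) with _ | ⟨r, t⟩
    · exact absurd hf hne
    · have hr : r ∈ b.filter (fun r => decide (r ≠ List.replicate w '.')) := by
        rw [hf]; exact List.mem_cons_self ..
      have hm := List.mem_filter.1 hr
      obtain ⟨c, hc, hcn⟩ := (hPre r hm.1).resolve_left (of_decide_eq_true hm.2)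
      exact List.any_eq_true.2 ⟨r, hm.1, List.any_eq_true.2 ⟨c, hc, decide_eq_true hcn⟩⟩
  · rw [List.all_eq_true]
    intro g hg
    rw [Bool.or_eq_true]
    by_cases hq : ∃ c ∈ g, ¬ c = '.'
    · have hgb : g ≠ List.replicate w '.' := by
        intro he
        obtain ⟨c, hc, hcn⟩ := hq
        rw [he] at hc
        exact hcn (List.eq_of_mem_replicate hc)
      exact Or.inr (decide_eq_true (hall g (List.mem_filter.2 ⟨hg, decide_eq_true hgb⟩)))
    · refine Or.inl ?_
      rw [Bool.not_eq_true', List.any_eq_false]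
      exact fun c hc h => hq ⟨c, hc, of_decide_eq_true h⟩

theorem pv_D_pos (b : List (List Char)) (w : Nat)
    (hPre : ∀ r ∈ b, r = List.replicate w '.' ∨ ∃ c ∈ r, ¬ c = '.')
    (hD : ((b.any (fun r => r.any (fun c => decide (c ≠ '.'))))
        && b.all (fun g => !(g.any (fun c => decide (c ≠ '.'))) || decide (w < pvLead g))) = true) :
    ((b.filter (fun r => decide (r ≠ List.replicate w '.'))) ≠ [] ∧
     ∀ r ∈ (b.filter (fun r => decide (r ≠ List.replicate w '.'))), w < pvLead r) := by
  rw [Bool.and_eq_true] at hD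
  obtain ⟨h1, h2⟩ := hD
  obtain ⟨r, hr, hrany⟩ := List.any_eq_true.1 h1
  obtain ⟨c, hc, hcd⟩ := List.any_eq_true.1 hrany
  have hcn : ¬ c = '.' := of_decide_eq_true hcd
  have hrb : r ≠ List.replicate w '.' := fun he => hcn (List.eq_of_mem_replicate (he ▸ hc))
  refine ⟨List.ne_nil_of_mem (List.mem_filter.2 ⟨hr, decide_eq_true hrb⟩), ?_⟩
  intro g hg
  have hm := List.mem_filter.1 hg
  obtain ⟨c2, hc2, hc2n⟩ := (hPre g hm.1).resolve_left (of_decide_eq_true hm.2)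
  have hor := List.all_eq_true.1 h2 g hm.1
  rw [Bool.or_eq_true] at hor
  rcases hor with hl | hrt
  · rw [Bool.not_eq_true'] at hl
    exact absurd (decide_eq_true hc2n) ((List.any_eq_false.1 hl) c2 hc2)
  · exact of_decide_eq_true hrt

theorem pv_tight_main (b : List (List Char)) (w : Nat)
    (hPre : ∀ r ∈ b, r = List.replicate w '.' ∨ ∃ c ∈ r, ¬ c = '.')
    (hne : (b.filter (fun r => decide (r ≠ List.replicate w '.'))) ≠ [])
    (hall : ∀ r ∈ (b.filter (fun r => decide (r ≠ List.replicate w '.'))), w < pvLead r) :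
    (match pvLoopA (List.replicate w '.') b w 0 with
     | none => ""
     | some (kept, li, lj) =>
        String.ofList (PySem.Chars.join ['\n']
          (kept.map (fun g => PySem.List.slice g (some (li : Int)) (some ((lj : Int) + 1)))))) ≠
    (let rows := b.filter (fun r => decide (r ≠ List.replicate w '.'))
     if rows = [] then ""
     else
       let width := (PySem.List.max? (rows.map List.length) (fun x => x)).getD 0
       let li := pvScanUp rows 0 width
       let lj := pvScanDown rows (width - 1) width
       String.ofList (PySem.Chars.join ['\n']
         (rows.map (fun r => PySem.List.slice r (some (li : Int)) (some ((lj : Int) + 1)))))) := by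
  rw [pv_loopA_char (List.replicate w '.') b hPre w 0]
  set rows := b.filter (fun r => decide (r ≠ List.replicate w '.')) with hrows_def
  have hAll : ∀ r ∈ rows, ∃ c ∈ r, ¬ c = '.' := by
    intro r hr
    have hmem := List.mem_filter.1 (hrows_def ▸ hr)
    exact (hPre r hmem.1).resolve_left (of_decide_eq_true hmem.2)
  obtain ⟨m, hmmem, hmmin⟩ := pv_list_min (rows.map pvLead) (by simpa using hne)
  obtain ⟨L, hLmem, hLmax⟩ :=
    pv_list_max (rows.map (fun r => r.length - 1 - pvLead r.reverse)) (by simpa using hne)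
  rcases hW : PySem.List.max? (rows.map List.length) (fun x => x) with _ | W
  · rw [PySem.List.max?_eq_none_iff] at hW
    exact absurd (List.map_eq_nil_iff.1 hW) hne
  obtain ⟨hup, hdown⟩ := pv_scan_vals rows hAll m L W hmmem hmmin hLmem hLmax hW
  have hwm : w < m := by
    obtain ⟨r0, hr0, hr0m⟩ := List.mem_map.1 hmmem
    exact hr0m ▸ hall r0 hr0
  have hli : rows.foldr (fun r a => min (pvLead r) a) w = w := by
    rw [← List.foldr_map]
    exact pv_foldr_min_const _ w (by
      intro x hx
      obtain ⟨r, hr, hrx⟩ := List.mem_map.1 hx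
      exact hrx ▸ Nat.le_of_lt (hall r hr))
  have hlj : rows.foldr (fun r a => max (r.length - 1 - pvLead r.reverse) a) 0 = L := by
    rw [← List.foldr_map]
    exact pv_foldr_max_eq _ 0 L hLmem hLmax (Nat.zero_le _)
  simp only [hli, hlj, if_neg hne, hW, Option.getD_some, hup, hdown]
  intro heq
  have htl := congrArg String.toList heq
  simp only [String.toList_ofList] at htl
  have hlen := congrArg List.length htl
  rw [pv_join_len, pv_join_len] at hlen
  simp only [List.length_map] at hlen
  have hfacts : ∀ r ∈ rows, w < pvLead r ∧ pvLead r < r.length ∧ m ≤ pvLead r ∧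
      r.length - 1 - pvLead r.reverse ≤ L ∧ pvLead r ≤ r.length - 1 - pvLead r.reverse := by
    intro r hr
    have h1 := hall r hr
    have h2 := pv_lead_lt r (hAll r hr)
    have h3 := hmmin (pvLead r) (List.mem_map_of_mem hr)
    have h4 := pv_lead_trail r (hAll r hr)
    have h5 := hLmax _ (List.mem_map_of_mem hr)
    exact ⟨h1, h2, h3, h5, by omega⟩
  have hcast : ((L : Nat) : Int) + 1 = (((L + 1 : Nat)) : Int) := by omega
  rw [hcast] at hlen
  have hA : (rows.map (fun g => PySem.List.slice g (some (w : Int)) (some ((L + 1 : Nat) : Int)))).map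
      List.length = rows.map (fun r => min (L + 1) r.length - w) := by
    rw [List.map_map]
    refine List.map_congr_left ?_
    intro r hr
    obtain ⟨h1, h2, h3, h4, h5⟩ := hfacts r hr
    show (PySem.List.slice r (some (w : Int)) (some ((L + 1 : Nat) : Int))).length = min (L + 1) r.length - w
    rw [PySem.List.length_slice, PySem.List.clampIdx_natCast, PySem.List.clampIdx_natCast]
    omega
  have hB : (rows.map (fun r => PySem.List.slice r (some (m : Int)) (some ((L + 1 : Nat) : Int)))).map
      List.length = rows.map (fun r => min (L + 1) r.length - m) := by
    rw [List.map_map]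
    refine List.map_congr_left ?_
    intro r hr
    obtain ⟨h1, h2, h3, h4, h5⟩ := hfacts r hr
    show (PySem.List.slice r (some (m : Int)) (some ((L + 1 : Nat) : Int))).length = min (L + 1) r.length - m
    rw [PySem.List.length_slice, PySem.List.clampIdx_natCast, PySem.List.clampIdx_natCast]
    omega
  rw [hA, hB] at hlen
  have hstrict : (rows.map (fun r => min (L + 1) r.length - m)).sum <
      (rows.map (fun r => min (L + 1) r.length - w)).sum := by
    refine pv_sum_lt rows _ _ hne ?_
    intro r hr
    obtain ⟨h1, h2, h3, h4, h5⟩ := hfacts r hr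
    omega
  omega

-- ===== VERDICT (by name: the statement is the Claim_ definition above) =====
theorem strip_string_rep_spec : Claim_unchanged_strip_string_rep := by
  intro br _ hPre
  unfold Spec_strip_string_rep
  intro hnd
  unfold Pre_strip_string_rep at hPre
  unfold D_strip_string_rep at hnd
  simp only [List.all_eq_true, Bool.or_eq_true, List.any_eq_true, decide_eq_true_eq] at hPre
  exact pv_main (PySem.Chars.splitOn br.toList ['\n'])
    (((PySem.Chars.splitOn br.toList ['\n']).headD []).length) hPre
    (pv_D_bridge _ _ hPre hnd)

set_option maxRecDepth 600000 in
theorem strip_string_rep_changed : Claim_changed_strip_string_rep := by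
  unfold Claim_changed_strip_string_rep; decide

theorem strip_string_rep_tight : Claim_exact_strip_string_rep := by
  intro br _ hPre hD
  unfold Pre_strip_string_rep at hPre
  unfold D_strip_string_rep at hD
  simp only [List.all_eq_true, Bool.or_eq_true, List.any_eq_true, decide_eq_true_eq] at hPre
  have h := pv_D_pos (PySem.Chars.splitOn br.toList ['\n'])
    (((PySem.Chars.splitOn br.toList ['\n']).headD []).length) hPre hD
  exact pv_tight_main (PySem.Chars.splitOn br.toList ['\n'])
    (((PySem.Chars.splitOn br.toList ['\n']).headD []).length) hPre h.1 h.2
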